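-- pv_equiv track=rewrite | github.com/timeeeee/qwantzle | utils.py | make_count_dict
-- ===== SOURCE A (Python) =====
-- from string import digits
--
-- def make_count_dict(count_string):
--     """Make dict of character counts from an anagram string"""
--     count_list = list(count_string)
--     count_dict = dict()
--     number_string = ""
--     while count_list:
--         char = count_list.pop(0)
--         if char in digits:
--             number_string += char
--         else:
--             if number_string:
--                 number = int(number_string)
--             else:
--                 number = 1
--             count_dict[char] = number
--             number_string = ""
--     return count_dict
-- ===== SOURCE B (Python) =====
-- from string import digits
--
--
-- def _tokens(s):
--     """Split s into (digit_run, following_char) pairs; trailing digits are dropped."""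
--     pairs = []
--     while True:
--         i = 0
--         while i < len(s) and s[i] in digits:
--             i += 1
--         if i == len(s):
--             return pairs
--         pairs.append((s[:i], s[i]))
--         s = s[i + 1:]
--
--
-- def make_count_dict(count_string):
--     """Make dict of character counts from an anagram string"""
--     return {c: (int(num) if num else 1) for num, c in _tokens(count_string)}
-- ===== Notes on version B (the rewrite author's own statement) =====
-- stated objective: faster
-- what changed: Replaced the pop(0)-driven state machine with mutable number_string accumulation by a tokenizer that splits the string into (digit-run, char) pairs plus a dict comprehension building the result.
import Mathlib
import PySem

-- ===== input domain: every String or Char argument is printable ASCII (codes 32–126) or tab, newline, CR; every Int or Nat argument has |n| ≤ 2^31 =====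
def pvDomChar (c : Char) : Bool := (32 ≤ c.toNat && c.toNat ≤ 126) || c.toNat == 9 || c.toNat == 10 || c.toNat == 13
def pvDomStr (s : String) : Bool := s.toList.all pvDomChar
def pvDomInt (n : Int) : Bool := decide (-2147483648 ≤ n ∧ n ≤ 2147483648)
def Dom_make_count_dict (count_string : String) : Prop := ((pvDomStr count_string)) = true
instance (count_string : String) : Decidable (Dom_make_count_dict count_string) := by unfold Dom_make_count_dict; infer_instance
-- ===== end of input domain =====

-- B replaces A's pop(0) state machine by a tokenize-into-(digits,char)-pairs pass plus a
-- dict-comprehension build; return values proved equal on all inputs.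

-- `string.digits`
def pvDigits : List Char := "0123456789".toList

-- ===== PORT A =====
-- A's while-loop over count_list with state (count_dict, number_string).
-- `int(number_string)` is ported as `(PySem.Int.ofChars? ns).getD 0`; the default is never
-- used: when taken, ns is a nonempty all-digit string, on which int() always succeeds.
def mcdLoopA : List Char → PySem.Dict String Int → List Char → PySem.Dict String Int
  | [], d, _ => d
  | c :: rest, d, ns =>
    if pvDigits.contains c then
      mcdLoopA rest d (ns ++ [c])
    else
      mcdLoopA rest
        (d.insert (String.singleton c)
          (if ns = [] then 1 else (PySem.Int.ofChars? ns).getD 0)) []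

def make_count_dict (count_string : String) : List (String × Int) :=
  (mcdLoopA count_string.toList PySem.Dict.empty []).items

-- ===== PORT B =====
-- B's `_tokens`: the inner index loop scanning a digit run is the takeWhile/dropWhile split.
def mcdTokens (cs : List Char) : List (List Char × Char) :=
  match h : cs.dropWhile (pvDigits.contains ·) with
  | [] => []
  | c :: rest => (cs.takeWhile (pvDigits.contains ·), c) :: mcdTokens rest
termination_by cs.length
decreasing_by
  have := List.length_dropWhile_le (p := (pvDigits.contains ·)) (l := cs)
  rw [h] at this; simp at this; omega

-- B's dict comprehension over the token pairs.
def make_count_dict_alt (count_string : String) : List (String × Int) :=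
  ((mcdTokens count_string.toList).foldl
    (fun d p =>
      d.insert (String.singleton p.2)
        (if p.1 = [] then 1 else (PySem.Int.ofChars? p.1).getD 0))
    PySem.Dict.empty).items

-- ===== PRECONDITION & SPEC =====
def Spec_make_count_dict (count_string : String) (out : List (String × Int)) : Prop := out = make_count_dict_alt count_string
instance (count_string : String) (out : List (String × Int)) : Decidable (Spec_make_count_dict count_string out) := by unfold Spec_make_count_dict; infer_instance

-- ===== CLAIM (what is proved, stated in full; the proofs are below) =====
def Claim_equal_make_count_dict : Prop := ∀ (count_string : String), Dom_make_count_dict count_string → Spec_make_count_dict count_string (make_count_dict count_string)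

-- ===== LEMMAS AND PROOFS =====

-- tokenizer with the pending digit-run prefix made explicit (proof-side only)
def tokAux : List Char → List Char → List (List Char × Char)
  | _, [] => []
  | ns, c :: r =>
    if pvDigits.contains c then tokAux (ns ++ [c]) r else (ns, c) :: tokAux [] r

def mcdStep (d : PySem.Dict String Int) (p : List Char × Char) : PySem.Dict String Int :=
  d.insert (String.singleton p.2) (if p.1 = [] then 1 else (PySem.Int.ofChars? p.1).getD 0)

def mcdTokensNs (ns cs : List Char) : List (List Char × Char) :=
  match cs.dropWhile (pvDigits.contains ·) with
  | [] => []
  | c :: rest => (ns ++ cs.takeWhile (pvDigits.contains ·), c) :: mcdTokens rest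

theorem mcdTokens_eq_ns (cs : List Char) : mcdTokens cs = mcdTokensNs [] cs := by
  unfold mcdTokensNs
  rw [mcdTokens]
  rcases h : cs.dropWhile (pvDigits.contains ·) with _ | ⟨c, rest⟩ <;> simp

theorem tokAux_eq (cs : List Char) : ∀ ns, tokAux ns cs = mcdTokensNs ns cs := by
  induction cs with
  | nil => intro ns; simp [tokAux, mcdTokensNs]
  | cons c r ih =>
    intro ns
    by_cases hc : pvDigits.contains c
    · rw [tokAux, if_pos hc, ih]
      unfold mcdTokensNs
      rw [List.dropWhile_cons_of_pos (by simpa using hc),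
          List.takeWhile_cons_of_pos (by simpa using hc)]
      rcases h : r.dropWhile (pvDigits.contains ·) with _ | ⟨c', rest⟩ <;> simp
    · rw [tokAux, if_neg hc]
      unfold mcdTokensNs
      rw [List.dropWhile_cons_of_neg (by simpa using hc),
          List.takeWhile_cons_of_neg (by simpa using hc)]
      rw [ih, ← mcdTokens_eq_ns]
      simp

theorem mcdLoopA_eq_fold (cs : List Char) :
    ∀ ns d, mcdLoopA cs d ns = (tokAux ns cs).foldl mcdStep d := by
  induction cs with
  | nil => intro ns d; simp [mcdLoopA, tokAux]
  | cons c r ih =>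
    intro ns d
    by_cases hc : pvDigits.contains c
    · rw [mcdLoopA, if_pos hc, ih, tokAux, if_pos hc]
    · rw [mcdLoopA, if_neg hc, ih, tokAux, if_neg hc]
      simp [mcdStep]

-- ===== VERDICT (by name: the statement is the Claim_ definition above) =====
theorem make_count_dict_spec : Claim_equal_make_count_dict := by
  intro s _
  unfold Spec_make_count_dict make_count_dict make_count_dict_alt
  rw [mcdLoopA_eq_fold, tokAux_eq, ← mcdTokens_eq_ns]
  rfl
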